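-- pv_equiv track=rewrite | github.com/chris-khan-1/advent-of-code-public | src/aoc_2015/day_17/aoc_2015_17_solution.py | get_min_container_combinations
-- ===== SOURCE A (Python) =====
-- from itertools import combinations
--
-- def get_min_container_combinations(
--     containers: list[int], total_size: int
-- ) -> list[tuple] | None:
--     container_combinations = []
--     for number_of_containers in range(1, len(containers) + 1):
--         for combo in combinations(containers, number_of_containers):
--             if sum(combo) == total_size:
--                 container_combinations.append(combo)
--         if len(container_combinations) == 0:
--             container_combinations = []
--         else:
--             return container_combinations
--     return None
-- ===== SOURCE B (Python) =====
-- def get_min_container_combinations(containers, total_size):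
--     def dfs(rest, k, cur, path):
--         # take-or-skip recursion over the list suffix, carrying the running sum
--         if k == 0:
--             return [path] if cur == total_size else []
--         if len(rest) < k:
--             return []
--         x = rest[0]
--         tail = rest[1:]
--         return dfs(tail, k - 1, cur + x, path + (x,)) + dfs(tail, k, cur, path)
--
--     for k in range(1, len(containers) + 1):
--         found = dfs(containers, k, 0, ())
--         if found:
--             return found
--     return None
-- ===== Notes on version B (the rewrite author's own statement) =====
-- stated objective: alternative
-- what changed: Replaces the itertools.combinations generate-then-sum filter with a take-or-skip recursion over the list that carries a running sum and prunes branches with too few elements left.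
import Mathlib
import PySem

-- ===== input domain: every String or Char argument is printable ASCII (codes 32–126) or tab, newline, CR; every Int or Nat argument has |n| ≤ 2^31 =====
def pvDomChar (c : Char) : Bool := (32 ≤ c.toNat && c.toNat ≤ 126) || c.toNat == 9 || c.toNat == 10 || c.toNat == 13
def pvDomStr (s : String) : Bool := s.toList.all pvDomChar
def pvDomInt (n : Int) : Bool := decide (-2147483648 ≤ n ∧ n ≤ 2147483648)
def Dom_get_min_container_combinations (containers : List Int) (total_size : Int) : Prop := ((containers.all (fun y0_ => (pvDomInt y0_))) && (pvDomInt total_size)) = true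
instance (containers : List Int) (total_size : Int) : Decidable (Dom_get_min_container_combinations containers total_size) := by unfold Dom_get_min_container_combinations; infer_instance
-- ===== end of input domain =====

-- B replaces the combinations-then-filter scan with a take-or-skip recursion carrying a running sum (alternative algorithm, same exact value).


-- ===== PORT A =====
-- the outer 'for number_of_containers in range(1, len(containers)+1)' with early return
def pvALoop (containers : List Int) (total_size : Int) : List Int → Option (List (List Int))
  | [] => none
  | k :: ks =>
    let combos := (PySem.List.combinations containers k.toNat).foldl
        (fun acc c => if c.sum = total_size then acc ++ [c] else acc) []
    if combos.length = 0 then pvALoop containers total_size ks else some combos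

def get_min_container_combinations (containers : List Int) (total_size : Int) : Option (List (List Int)) :=
  pvALoop containers total_size (PySem.List.pyRange 1 ((containers.length : Int) + 1) 1)

-- ===== PORT B =====
-- take-or-skip recursion over the suffix `rest`, carrying the running sum `cur` and the chosen prefix `path`
def pvBdfs (total_size : Int) : List Int → Nat → Int → List Int → List (List Int)
  | _, 0, cur, path => if cur = total_size then [path] else []
  | [], _ + 1, _, _ => []
  | x :: tail, k + 1, cur, path =>
    if tail.length + 1 < k + 1 then []
    else pvBdfs total_size tail k (cur + x) (path ++ [x]) ++ pvBdfs total_size tail (k + 1) cur path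

def pvBLoop (containers : List Int) (total_size : Int) : List Int → Option (List (List Int))
  | [] => none
  | k :: ks =>
    let found := pvBdfs total_size containers k.toNat 0 []
    if found.isEmpty then pvBLoop containers total_size ks else some found

def get_min_container_combinations_alt (containers : List Int) (total_size : Int) : Option (List (List Int)) :=
  pvBLoop containers total_size (PySem.List.pyRange 1 ((containers.length : Int) + 1) 1)

-- ===== PRECONDITION & SPEC =====
def Spec_get_min_container_combinations (containers : List Int) (total_size : Int) (out : Option (List (List Int))) : Prop := out = get_min_container_combinations_alt containers total_size
instance (containers : List Int) (total_size : Int) (out : Option (List (List Int))) : Decidable (Spec_get_min_container_combinations containers total_size out) := by unfold Spec_get_min_container_combinations; infer_instance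

-- ===== CLAIM (what is proved, stated in full; the proofs are below) =====
def Claim_equal_get_min_container_combinations : Prop := ∀ (containers : List Int) (total_size : Int), Dom_get_min_container_combinations containers total_size → Spec_get_min_container_combinations containers total_size (get_min_container_combinations containers total_size)

-- ===== LEMMAS AND PROOFS =====

-- the take-or-skip recursion computes exactly the filtered combinations, prefixed with `path`
theorem pvBdfs_eq (total_size : Int) (rest : List Int) :
    ∀ (k : Nat) (cur : Int) (path : List Int),
      pvBdfs total_size rest k cur path =
        ((PySem.List.combinations rest k).filter (fun c => cur + c.sum = total_size)).map (path ++ ·) := by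
  induction rest with
  | nil =>
    intro k cur path
    cases k with
    | zero => by_cases hc : cur = total_size <;> simp [pvBdfs, PySem.List.combinations_zero, hc]
    | succ k => simp [pvBdfs, PySem.List.combinations_nil_succ]
  | cons x tail ih =>
    intro k cur path
    cases k with
    | zero => by_cases hc : cur = total_size <;> simp [pvBdfs, PySem.List.combinations_zero, hc]
    | succ k =>
      by_cases h : tail.length + 1 < k + 1
      · have hnil : PySem.List.combinations (x :: tail) (k + 1) = [] :=
          PySem.List.combinations_eq_nil_of_length_lt (xs := x :: tail) (r := k + 1)
            (by simp only [List.length_cons]; omega)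
        simp [pvBdfs, h, hnil]
      · rw [show pvBdfs total_size (x :: tail) (k + 1) cur path =
              pvBdfs total_size tail k (cur + x) (path ++ [x]) ++ pvBdfs total_size tail (k + 1) cur path from by
            simp [pvBdfs, h]]
        rw [ih k (cur + x) (path ++ [x]), ih (k + 1) cur path,
            PySem.List.combinations_cons_succ, List.filter_append, List.map_append,
            List.filter_map, List.map_map]
        congr 1
        have hp : (fun c : List Int => decide (cur + (x :: c).sum = total_size)) =
            (fun c : List Int => decide (cur + x + c.sum = total_size)) := by
          funext c; simp [add_assoc]
        have hf : (fun c : List Int => path ++ x :: c) =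
            (fun c : List Int => path ++ [x] ++ c) := by
          funext c; simp
        simp only [Function.comp_def, hp, hf, List.append_assoc]

-- A's inner append loop is a filter
theorem pvAInner_eq (containers : List Int) (total_size : Int) (k : Nat) :
    (PySem.List.combinations containers k).foldl
        (fun acc c => if c.sum = total_size then acc ++ [c] else acc) [] =
      (PySem.List.combinations containers k).filter (fun c => c.sum = total_size) := by
  simpa using PySem.List.foldl_append_ite_eq_filter
    (l := PySem.List.combinations containers k) (p := fun c => c.sum = total_size) (acc := [])

theorem pvLoop_eq (containers : List Int) (total_size : Int) :
    ∀ ks : List Int, pvALoop containers total_size ks = pvBLoop containers total_size ks := by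
  intro ks
  induction ks with
  | nil => rfl
  | cons k ks ih =>
    have hdfs := pvBdfs_eq total_size containers k.toNat 0 []
    simp only [pvALoop, pvBLoop, pvAInner_eq, hdfs]
    simp [List.isEmpty_iff, List.length_eq_zero_iff, ih]

-- ===== VERDICT (by name: the statement is the Claim_ definition above) =====
theorem get_min_container_combinations_spec : Claim_equal_get_min_container_combinations := by
  intro containers total_size _
  unfold Spec_get_min_container_combinations get_min_container_combinations get_min_container_combinations_alt
  exact pvLoop_eq containers total_size _
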